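-- pv_equiv track=rewrite | github.com/chamilstudy/ulpgc_ap_recurrency | solve.py | solve
-- ===== SOURCE A (Python) =====
-- mem = {}
--
-- def getKey(p,q):
--     return str(p) + '|' + str(q)
--
-- def solve(p, q):
--     key = getKey(p,q)
--
--     if key not in mem:
--         if p == q:
--             return 1
--
--         sum = 0
--         for k in range(p, q):
--             sum += solve(p,k) + solve(k+1,q)
--
--         mem[key] = max(solve(p+1,q), sum)
--         return mem[key]
--     else:
--         return mem[key]
-- ===== SOURCE B (Python) =====
-- def solve(p, q):
--     n = q - p
--     if n == 0:
--         return 1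
--     return 2 * 3 ** (n - 1)
-- ===== Notes on version B (the rewrite author's own statement) =====
-- stated objective: faster
-- what changed: Replaces the memoized triple recursion over all split points of the interval with the closed form 1 if p==q else 2*3^(q-p-1).
import Mathlib
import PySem

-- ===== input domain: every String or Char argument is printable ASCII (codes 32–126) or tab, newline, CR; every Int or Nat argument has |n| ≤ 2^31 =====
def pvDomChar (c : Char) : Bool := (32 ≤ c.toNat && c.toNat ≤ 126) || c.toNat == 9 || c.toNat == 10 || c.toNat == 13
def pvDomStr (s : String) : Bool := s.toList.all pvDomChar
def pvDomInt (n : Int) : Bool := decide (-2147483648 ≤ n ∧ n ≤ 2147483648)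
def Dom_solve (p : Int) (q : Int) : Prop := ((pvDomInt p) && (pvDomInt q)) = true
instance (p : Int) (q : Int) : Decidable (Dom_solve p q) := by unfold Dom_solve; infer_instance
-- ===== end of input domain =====

-- B replaces A's memoized triple recursion over interval split points by the closed form
-- 1 if p == q else 2*3^(q-p-1).

-- ===== PORT A =====
-- A's recursion is total only for p ≤ q; the port uses a fuel counter (one unit per level of
-- the gap q-p, which every recursive call strictly decreases) to make the same computation
-- total; the fuel-0 branch is never reached when p ≤ q. The module-global memo dict 'mem' is
-- threaded through the recursion as an extra argument/result (Python's hash dict is modelled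
-- by Std.HashMap with the same string keys; it only caches deterministic results, so the
-- returned Int is unaffected).
def getKey (p : Int) (q : Int) : String :=
  PySem.Int.toStr p ++ "|" ++ PySem.Int.toStr q

def solveAux : Nat → Int → Int → Std.HashMap String Int → Int × Std.HashMap String Int
  | 0, _, _, m => (0, m)
  | f+1, p, q, m =>
    let key := getKey p q
    match m[key]? with
    | none =>
      if p = q then (1, m)
      else
        let sm := (PySem.List.pyRange p q 1).foldl
          (fun acc k =>
            let a := solveAux f p k acc.2
            let b := solveAux f (k+1) q a.2
            (acc.1 + (a.1 + b.1), b.2)) (0, m)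
        let t := solveAux f (p+1) q sm.2
        let r := max t.1 sm.1
        (r, t.2.insert key r)
    | some v => (v, m)

def solve (p : Int) (q : Int) : Int :=
  (solveAux ((q - p).toNat + 1) p q ∅).1

-- ===== PORT B =====
def solve_alt (p : Int) (q : Int) : Int :=
  if q - p = 0 then 1 else 2 * 3 ^ (q - p - 1).toNat

-- ===== PRECONDITION & SPEC =====
-- Pre_ excludes p > q, where Python A recurses forever (RecursionError) and B's 3**(n-1) leaves Int.
def Pre_solve (p : Int) (q : Int) : Prop := p ≤ q
instance (p : Int) (q : Int) : Decidable (Pre_solve p q) := by unfold Pre_solve; infer_instance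
def pvWitness_solve : Int × Int := (2, 5)
def Spec_solve (p : Int) (q : Int) (out : Int) : Prop := out = solve_alt p q
instance (p : Int) (q : Int) (out : Int) : Decidable (Spec_solve p q out) := by unfold Spec_solve; infer_instance

-- ===== CLAIM (what is proved, stated in full; the proofs are below) =====
def Claim_equal_solve : Prop := ∀ (p : Int) (q : Int), Dom_solve p q → Pre_solve p q → Spec_solve p q (solve p q)

-- ===== LEMMAS AND PROOFS =====

-- closed form as a function of the gap n = (q-p).toNat
def pvC (m : Nat) : Int := if m = 0 then 1 else 2 * 3 ^ (m - 1)

lemma solve_alt_eq_pvC (p q : Int) (h : p ≤ q) : solve_alt p q = pvC (q - p).toNat := by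
  unfold solve_alt pvC
  rcases eq_or_lt_of_le h with h' | h'
  · simp [h']
  · have h0 : q - p ≠ 0 := by omega
    have h1 : (q - p).toNat ≠ 0 := by omega
    have h2 : (q - p - 1).toNat = (q - p).toNat - 1 := by omega
    simp [h0, h1, h2]

lemma sum_range_pvC (n : Nat) :
    ((List.range n).map pvC).sum = if n = 0 then 0 else 3 ^ (n - 1) := by
  induction n with
  | zero => simp
  | succ n ih =>
    rw [List.range_succ, List.map_append, List.sum_append, ih]
    rcases Nat.eq_zero_or_pos n with h | h
    · simp [h, pvC]
    · have h1 : n ≠ 0 := by omega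
      have h2 : n - 1 + 1 = n := by omega
      rw [if_neg h1, if_neg (Nat.succ_ne_zero n)]
      simp only [List.map_cons, List.map_nil, List.sum_cons, List.sum_nil, pvC, if_neg h1,
        Nat.succ_sub_one]
      conv_rhs => rw [← h2, pow_succ]
      ring

lemma sum_range_pvC_reflect (n : Nat) :
    ((List.range n).map (fun j => pvC (n - 1 - j))).sum = ((List.range n).map pvC).sum := by
  have h1 : ((List.range n).map (fun j => pvC (n - 1 - j))).sum
      = ∑ j ∈ Finset.range n, pvC (n - 1 - j) := rfl
  have h2 : ((List.range n).map pvC).sum = ∑ j ∈ Finset.range n, pvC j := rfl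
  rw [h1, h2, Finset.sum_range_reflect]

lemma pvC_le (n : Nat) (_h : n ≠ 0) : pvC (n - 1) ≤ 2 * 3 ^ (n - 1) := by
  unfold pvC
  split_ifs with h1
  · rw [h1]; norm_num
  · have : (3:Int) ^ (n - 1 - 1) ≤ 3 ^ (n - 1) :=
      pow_le_pow_right₀ (by norm_num) (by omega)
    linarith

-- ---- injectivity of Python's string key 'str(p) + "|" + str(q)' ----

-- the decimal digit list produced by Nat.toDigits 10 (most significant first)
def pvDigs (n : Nat) : List Char :=
  if _h : n < 10 then [Nat.digitChar n] else pvDigs (n / 10) ++ [Nat.digitChar (n % 10)]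
  decreasing_by exact Nat.div_lt_self (by omega) (by omega)

lemma pvToDigitsCore_eq : ∀ (f n : Nat) (l : List Char), n < f →
    Nat.toDigitsCore 10 f n l = pvDigs n ++ l := by
  intro f
  induction f with
  | zero => intro n l h; omega
  | succ f ih =>
    intro n l h
    rw [Nat.toDigitsCore, pvDigs]
    by_cases h10 : n < 10
    · have hz : n / 10 = 0 := by omega
      simp [hz, h10, Nat.mod_eq_of_lt h10]
    · have h1 : n / 10 ≠ 0 := by omega
      have h2 : n / 10 < f := by omega
      simp only [h10, dite_false, if_neg h1]
      rw [ih (n / 10) _ h2, List.append_assoc]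
      rfl

lemma pvToDigits_eq (n : Nat) : Nat.toDigits 10 n = pvDigs n := by
  rw [Nat.toDigits, pvToDigitsCore_eq (n + 1) n [] (by omega), List.append_nil]

lemma pvDigitChar_toNat (n : Nat) (h : n < 10) : (Nat.digitChar n).toNat = 48 + n := by
  interval_cases n <;> rfl

lemma pvDigs_digit (n : Nat) : ∀ c ∈ pvDigs n, 48 ≤ c.toNat ∧ c.toNat ≤ 57 := by
  induction n using Nat.strong_induction_on with
  | _ n ih =>
    intro c hc
    rw [pvDigs] at hc
    by_cases h10 : n < 10
    · simp only [h10, dite_true, List.mem_singleton] at hc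
      subst hc
      rw [pvDigitChar_toNat n h10]; omega
    · simp only [h10, dite_false, List.mem_append, List.mem_singleton] at hc
      rcases hc with hc | hc
      · exact ih (n / 10) (Nat.div_lt_self (by omega) (by omega)) c hc
      · subst hc
        rw [pvDigitChar_toNat (n % 10) (by omega)]; omega

def pvVal (l : List Char) : Nat := l.foldl (fun a c => 10 * a + (c.toNat - 48)) 0

lemma pvVal_append_singleton (l : List Char) (c : Char) :
    pvVal (l ++ [c]) = 10 * pvVal l + (c.toNat - 48) := by
  unfold pvVal
  rw [List.foldl_append]
  rfl

lemma pvVal_digs (n : Nat) : pvVal (pvDigs n) = n := by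
  induction n using Nat.strong_induction_on with
  | _ n ih =>
    rw [pvDigs]
    by_cases h10 : n < 10
    · simp only [h10, dite_true]
      show 10 * 0 + ((Nat.digitChar n).toNat - 48) = n
      rw [pvDigitChar_toNat n h10]; omega
    · simp only [h10, dite_false]
      rw [pvVal_append_singleton, ih (n / 10) (Nat.div_lt_self (by omega) (by omega)),
        pvDigitChar_toNat (n % 10) (by omega)]
      omega

lemma pvDigs_inj {a b : Nat} (h : pvDigs a = pvDigs b) : a = b := by
  have := pvVal_digs a
  rw [h, pvVal_digs b] at this
  omega

lemma pvDigs_ne_nil (n : Nat) : pvDigs n ≠ [] := by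
  rw [pvDigs]
  split_ifs <;> simp

lemma pvBar_not_mem_digs (n : Nat) : '|' ∉ pvDigs n := by
  intro h
  have := pvDigs_digit n '|' h
  simp [Char.toNat] at this

lemma pvDash_not_mem_digs (n : Nat) : '-' ∉ pvDigs n := by
  intro h
  have := pvDigs_digit n '-' h
  simp [Char.toNat] at this

lemma pvToChars_eq (n : Int) : PySem.Int.toChars n =
    if n < 0 then '-' :: pvDigs n.natAbs else pvDigs n.toNat := by
  rw [PySem.Int.toChars]
  split_ifs with h <;> rw [pvToDigits_eq]

lemma pvBar_not_mem_toChars (n : Int) : '|' ∉ PySem.Int.toChars n := by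
  rw [pvToChars_eq]
  split_ifs with h
  · intro hc
    rcases List.mem_cons.mp hc with hc | hc
    · exact absurd hc (by decide)
    · exact pvBar_not_mem_digs _ hc
  · exact pvBar_not_mem_digs _

lemma pvToChars_inj {a b : Int} (h : PySem.Int.toChars a = PySem.Int.toChars b) : a = b := by
  rw [pvToChars_eq, pvToChars_eq] at h
  split_ifs at h with h1 h2 h2
  · have h2 : pvDigs a.natAbs = pvDigs b.natAbs := by injection h
    have := pvDigs_inj h2
    omega
  · exfalso
    rcases List.exists_cons_of_ne_nil (pvDigs_ne_nil b.toNat) with ⟨c, t, hct⟩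
    rw [hct] at h
    have : c = '-' := ((List.cons.injEq _ _ _ _).mp h).1.symm
    exact pvDash_not_mem_digs b.toNat (hct ▸ (this ▸ List.mem_cons_self))
  · exfalso
    rcases List.exists_cons_of_ne_nil (pvDigs_ne_nil a.toNat) with ⟨c, t, hct⟩
    rw [hct] at h
    have : c = '-' := ((List.cons.injEq _ _ _ _).mp h).1
    exact pvDash_not_mem_digs a.toNat (hct ▸ (this ▸ List.mem_cons_self))
  · have := pvDigs_inj h
    omega

lemma pvSplitBar : ∀ (xs xs' ys ys' : List Char), xs ++ '|' :: ys = xs' ++ '|' :: ys' →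
    '|' ∉ xs → '|' ∉ xs' → xs = xs' ∧ ys = ys' := by
  intro xs
  induction xs with
  | nil =>
    intro xs' ys ys' h hx hx'
    cases xs' with
    | nil => simpa using h
    | cons c t =>
      exfalso
      have : '|' = c := ((List.cons.injEq _ _ _ _).mp h).1
      exact hx' (this ▸ List.mem_cons_self)
  | cons c t ih =>
    intro xs' ys ys' h hx hx'
    cases xs' with
    | nil =>
      exfalso
      have : c = '|' := ((List.cons.injEq _ _ _ _).mp h).1
      exact hx (this ▸ List.mem_cons_self)
    | cons c' t' =>
      have h1 := (List.cons.injEq _ _ _ _).mp h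
      have h2 := ih t' ys ys' h1.2 (fun hm => hx (List.mem_cons_of_mem _ hm))
        (fun hm => hx' (List.mem_cons_of_mem _ hm))
      exact ⟨by rw [h1.1, h2.1], h2.2⟩

lemma getKey_toList (p q : Int) :
    (getKey p q).toList = PySem.Int.toChars p ++ '|' :: PySem.Int.toChars q := by
  unfold getKey
  rw [String.toList_append, String.toList_append, PySem.Int.toList_toStr, PySem.Int.toList_toStr]
  simp

lemma getKey_inj {a b p q : Int} (h : getKey a b = getKey p q) : a = p ∧ b = q := by
  have h' : (getKey a b).toList = (getKey p q).toList := by rw [h]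
  rw [getKey_toList, getKey_toList] at h'
  have := pvSplitBar _ _ _ _ h' (pvBar_not_mem_toChars a) (pvBar_not_mem_toChars p)
  exact ⟨pvToChars_inj this.1, pvToChars_inj this.2⟩

-- ---- memo invariant and the main evaluation lemma ----

def pvInv (m : Std.HashMap String Int) : Prop :=
  ∀ a b : Int, a ≤ b → ∀ v, m[getKey a b]? = some v → v = pvC (b - a).toNat

lemma pvInv_empty : pvInv (∅ : Std.HashMap String Int) := by
  intro a b _ v hv
  simp at hv

lemma pvInv_insert (m : Std.HashMap String Int) (p q : Int) (_hpq : p ≤ q)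
    (hm : pvInv m) : pvInv (m.insert (getKey p q) (pvC (q - p).toNat)) := by
  intro a b hab v hv
  rw [Std.HashMap.getElem?_insert] at hv
  by_cases hk : getKey p q = getKey a b
  · rcases getKey_inj hk with ⟨h1, h2⟩
    simp only [hk, beq_self_eq_true, if_true, Option.some.injEq] at hv
    subst h1; subst h2
    exact hv.symm
  · rw [if_neg (by simpa using hk)] at hv
    exact hm a b hab v hv

lemma solveAux_eq (f : Nat) : ∀ (p q : Int) (m : Std.HashMap String Int),
    p ≤ q → (q - p).toNat < f → pvInv m →
    (solveAux f p q m).1 = pvC (q - p).toNat ∧ pvInv (solveAux f p q m).2 := by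
  induction f with
  | zero => intro p q m _ h _; omega
  | succ f ih =>
    intro p q m hpq hf hm
    rw [solveAux]
    cases hlook : m[getKey p q]? with
    | some v =>
      simp only
      exact ⟨hm p q hpq v hlook, hm⟩
    | none =>
      simp only
      rcases eq_or_lt_of_le hpq with h | h
      · subst h
        simp [pvC, hm]
      · have hne : p ≠ q := by omega
        rw [if_neg hne]
        set n : Nat := (q - p).toNat with hn
        have hn1 : n ≠ 0 := by omega
        -- the accumulation loop
        have hloop : ∀ (l : List Int), (∀ k ∈ l, p ≤ k ∧ k < q) →
            ∀ (acc : Int) (m0 : Std.HashMap String Int), pvInv m0 →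
            (l.foldl (fun acc k =>
                let a := solveAux f p k acc.2
                let b := solveAux f (k+1) q a.2
                (acc.1 + (a.1 + b.1), b.2)) (acc, m0)).1
              = acc + (l.map (fun k => pvC (k - p).toNat + pvC (q - (k+1)).toNat)).sum ∧
            pvInv (l.foldl (fun acc k =>
                let a := solveAux f p k acc.2
                let b := solveAux f (k+1) q a.2
                (acc.1 + (a.1 + b.1), b.2)) (acc, m0)).2 := by
          intro l
          induction l with
          | nil => intro _ acc m0 hm0; simp [hm0]
          | cons k t iht =>
            intro hmem acc m0 hm0
            have hk := hmem k List.mem_cons_self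
            have ha := ih p k m0 hk.1 (by omega) hm0
            have hb := ih (k+1) q (solveAux f p k m0).2 (by omega) (by omega) ha.2
            rw [List.foldl_cons]
            have ht := iht (fun x hx => hmem x (List.mem_cons_of_mem _ hx))
              (acc + ((solveAux f p k m0).1 + (solveAux f (k+1) q (solveAux f p k m0).2).1))
              (solveAux f (k+1) q (solveAux f p k m0).2).2 hb.2
            refine ⟨?_, ht.2⟩
            rw [ht.1, ha.1, hb.1, List.map_cons, List.sum_cons]
            ring
        have hsm := hloop (PySem.List.pyRange p q 1)
          (fun k hk => by rw [PySem.List.mem_pyRange_one] at hk; exact hk) 0 m hm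
        have ht := ih (p+1) q _ (by omega) (by omega) hsm.2
        -- compute the loop's sum
        have hmap : (PySem.List.pyRange p q 1).map
              (fun k => pvC (k - p).toNat + pvC (q - (k+1)).toNat)
            = (List.range n).map (fun j => pvC j + pvC (n - 1 - j)) := by
          rw [hn, PySem.List.pyRange_one, List.map_map]
          refine List.map_congr_left (fun j hj => ?_)
          rw [List.mem_range] at hj
          simp only [Function.comp_apply]
          congr 1 <;> congr 1 <;> omega
        rw [hmap] at hsm
        have hsum : ((List.range n).map (fun j => pvC j + pvC (n - 1 - j))).sum
            = 3 ^ (n - 1) + 3 ^ (n - 1) := by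
          rw [List.sum_map_add, sum_range_pvC_reflect, sum_range_pvC, if_neg hn1]
        rw [hsum, zero_add] at hsm
        have hq1 : (q - (p+1)).toNat = n - 1 := by omega
        rw [hq1] at ht
        have hr : max (solveAux f (p+1) q
              ((PySem.List.pyRange p q 1).foldl (fun acc k =>
                let a := solveAux f p k acc.2
                let b := solveAux f (k+1) q a.2
                (acc.1 + (a.1 + b.1), b.2)) (0, m)).2).1
            ((PySem.List.pyRange p q 1).foldl (fun acc k =>
                let a := solveAux f p k acc.2
                let b := solveAux f (k+1) q a.2
                (acc.1 + (a.1 + b.1), b.2)) (0, m)).1 = pvC n := by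
          rw [ht.1, hsm.1]
          have hle := pvC_le n hn1
          have hC : pvC n = 2 * 3 ^ (n - 1) := by rw [pvC, if_neg hn1]
          rw [hC]
          generalize (3:Int) ^ (n - 1) = x at hle ⊢
          generalize pvC (n - 1) = y at hle ⊢
          omega
        constructor
        · exact hr
        · show pvInv (Std.HashMap.insert _ (getKey p q) _)
          rw [hr]
          exact pvInv_insert _ p q hpq ht.2

-- ===== VERDICT (by name: the statement is the Claim_ definition above) =====
theorem solve_spec : Claim_equal_solve := by
  intro p q _ hpre
  unfold Spec_solve solve
  rw [solve_alt_eq_pvC p q hpre]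
  exact (solveAux_eq ((q - p).toNat + 1) p q ∅ hpre (by omega) pvInv_empty).1
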